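-- pv_equiv track=rewrite | github.com/clintval/nucleic | nucleic/distance.py | hamming_circle
-- ===== SOURCE A (Python) =====
-- from itertools import combinations, product
-- from typing import Callable, Generator, List, Optional, Union
--
-- def hamming_circle(
--     sequence: str, n: int, alphabet: Optional[str] = None
-- ) -> Generator[str, None, None]:
--     """Find strings, of a given character alphabet, with a distance of `n` away from a sequence.
--
--     Args:
--         sequence: A sequence of characters.
--         n: The Hamming distance all returned items should be to *sequence*.
--         alphabet: The alphabet to use when mutating *sequence*, optional.
--
--     Yields:
--         The next sequence found with a distance of `n`.
--
--     Examples: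
--         >>> sorted(hamming_circle('abc', n=0))
--         ['abc']
--         >>> sorted(hamming_circle('abc', n=1, alphabet='abc'))
--         ['aac', 'aba', 'abb', 'acc', 'bbc', 'cbc']
--         >>> sorted(hamming_circle('aaa', n=2, alphabet='ab'))
--         ['abb', 'bab', 'bba']
--
--     """
--     if not isinstance(sequence, str):
--         raise TypeError('`sequence` must be of type `str`.')
--
--     if alphabet is None:
--         alphabet = ''.join(sorted(set(sequence)))
--
--     for positions in combinations(range(len(sequence)), n):
--         for replacements in product(range(len(alphabet)), repeat=n):
--             skip = False
--             cousin = list(sequence)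
--
--             for position, replacement in zip(positions, replacements):
--                 if cousin[position] == alphabet[replacement]:
--                     skip = True
--                 else:
--                     cousin[position] = alphabet[replacement]
--
--             if skip is False:
--                 yield ''.join(cousin)
-- ===== SOURCE B (Python) =====
-- from itertools import combinations, product
--
-- def hamming_circle(sequence, n, alphabet=None):
--     """Yield strings at Hamming distance exactly n from sequence, same order as A,
--     but via a product over per-position non-matching characters (no skipped tuples)."""
--     if alphabet is None:
--         alphabet = ''.join(sorted(set(sequence)))
--     options = [[c for c in alphabet if c != ch] for ch in sequence]
--     for positions in combinations(range(len(sequence)), n):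
--         for choice in product(*(options[p] for p in positions)):
--             cousin = list(sequence)
--             for p, c in zip(positions, choice):
--                 cousin[p] = c
--             yield ''.join(cousin)
-- ===== Notes on version B (the rewrite author's own statement) =====
-- stated objective: alternative
-- what changed: B precomputes, for each position, the list of alphabet characters that differ from the original character and takes the product of those lists directly, instead of A's product over all alphabet indices with a skip flag that discards mismatching tuples.
import Mathlib
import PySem

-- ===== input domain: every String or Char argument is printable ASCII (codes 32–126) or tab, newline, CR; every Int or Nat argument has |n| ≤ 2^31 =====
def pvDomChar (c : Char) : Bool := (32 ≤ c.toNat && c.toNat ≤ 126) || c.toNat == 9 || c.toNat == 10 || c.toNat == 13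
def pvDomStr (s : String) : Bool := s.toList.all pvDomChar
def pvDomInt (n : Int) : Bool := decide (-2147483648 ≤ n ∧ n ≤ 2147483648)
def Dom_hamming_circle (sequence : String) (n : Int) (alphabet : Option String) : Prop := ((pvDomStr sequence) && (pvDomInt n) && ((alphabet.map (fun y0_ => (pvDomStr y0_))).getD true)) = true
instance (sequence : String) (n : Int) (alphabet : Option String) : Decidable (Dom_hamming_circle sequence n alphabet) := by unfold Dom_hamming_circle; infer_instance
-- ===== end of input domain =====

-- B replaces A's product over ALL alphabet indices (with a skip flag discarding tuples
-- that re-create an original character) by a product over per-position lists of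
-- non-matching characters (an alternative algorithm; same values, same yield order).

-- ===== PORT A =====
-- itertools.combinations(l, k) in lexicographic order (shared: both Pythons call it)
def pvComb (l : List Nat) (k : Nat) : List (List Nat) :=
  match l, k with
  | _, 0 => [[]]
  | [], _+1 => []
  | x :: xs, k+1 =>
      -- itertools.combinations(l, r) is empty when r > len(l) (immediate, no recursion)
      if xs.length + 1 < k + 1 then []
      else (pvComb xs k).map (x :: ·) ++ pvComb xs (k+1)

-- alphabet = ''.join(sorted(set(sequence))) when None (shared: identical line in both Pythons)
def pvAlph (s : List Char) (alphabet : Option String) : List Char :=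
  match alphabet with
  | some a => a.toList
  | none => PySem.List.sorted (PySem.Set.ofList s) (fun c => c) false

-- itertools.product(range(m), repeat=k), last coordinate fastest
def pvProdRep (xs : List Nat) : Nat → List (List Nat)
  | 0 => [[]]
  | k+1 => xs.flatMap (fun x => (pvProdRep xs k).map (x :: ·))

-- A's inner loop body: fold over zip(positions, replacements) carrying (skip, cousin);
-- positions/replacements come from range(...) so getD/set are exact for the in-range indices.
def pvStepA (alph : List Char) (st : Bool × List Char) (pr : Nat × Nat) : Bool × List Char :=
  if st.2.getD pr.1 ' ' == alph.getD pr.2 ' ' then (true, st.2)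
  else (st.1, st.2.set pr.1 (alph.getD pr.2 ' '))

def pvInnerA (alph : List Char) (c : List Char) (ps rs : List Nat) : Option String :=
  let st := (ps.zip rs).foldl (pvStepA alph) (false, c)
  if st.1 then none else some (String.mk st.2)

def hamming_circle (sequence : String) (n : Int) (alphabet : Option String) : List String :=
  let s := sequence.toList
  let alph := pvAlph s alphabet
  (pvComb (List.range s.length) n.toNat).flatMap (fun ps =>
    (pvProdRep (List.range alph.length) n.toNat).filterMap (pvInnerA alph s ps))

-- ===== PORT B =====
-- per-position list of alphabet characters different from the original character
def pvOpts (alph : List Char) (c : List Char) (p : Nat) : List Char :=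
  alph.filter (fun ch => !(ch == c.getD p ' '))

-- itertools.product(*lists), last coordinate fastest
def pvProdLists : List (List Char) → List (List Char)
  | [] => [[]]
  | l :: ls => l.flatMap (fun x => (pvProdLists ls).map (x :: ·))

def pvApplyB (c : List Char) (ps : List Nat) (cs : List Char) : String :=
  String.mk ((ps.zip cs).foldl (fun c pr => c.set pr.1 pr.2) c)

def hamming_circle_alt (sequence : String) (n : Int) (alphabet : Option String) : List String :=
  let s := sequence.toList
  let alph := pvAlph s alphabet
  (pvComb (List.range s.length) n.toNat).flatMap (fun ps =>
    (pvProdLists (ps.map (pvOpts alph s))).map (pvApplyB s ps))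

-- ===== PRECONDITION & SPEC =====
-- Python raises ValueError (combinations with negative r) for n < 0, in A and in B alike.
def Pre_hamming_circle (sequence : String) (n : Int) (alphabet : Option String) : Prop := 0 ≤ n
instance (sequence : String) (n : Int) (alphabet : Option String) : Decidable (Pre_hamming_circle sequence n alphabet) := by unfold Pre_hamming_circle; infer_instance
def pvWitness_hamming_circle : String × Int × Option String := ("abc", 1, some "abc")

def Spec_hamming_circle (sequence : String) (n : Int) (alphabet : Option String) (out : List String) : Prop := out = hamming_circle_alt sequence n alphabet
instance (sequence : String) (n : Int) (alphabet : Option String) (out : List String) : Decidable (Spec_hamming_circle sequence n alphabet out) := by unfold Spec_hamming_circle; infer_instance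

-- ===== CLAIM (what is proved, stated in full; the proofs are below) =====
def Claim_equal_hamming_circle : Prop := ∀ (sequence : String) (n : Int) (alphabet : Option String), Dom_hamming_circle sequence n alphabet → Pre_hamming_circle sequence n alphabet → Spec_hamming_circle sequence n alphabet (hamming_circle sequence n alphabet)

-- ===== LEMMAS AND PROOFS =====

-- once skip is true it stays true, so the tuple is discarded
theorem pvStepA_skip (alph : List Char) (l : List (Nat × Nat)) (c : List Char) :
    (l.foldl (pvStepA alph) (true, c)).1 = true := by
  induction l generalizing c with
  | nil => rfl
  | cons pr l ih =>
      simp only [List.foldl_cons, pvStepA]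
      split <;> exact ih _

theorem pvMap_getD_range {α : Type} (l : List α) (d : α) :
    (List.range l.length).map (fun r => l.getD r d) = l := by
  apply List.ext_getElem (by simp)
  intro i h1 h2
  simp [List.getD_eq_getElem?_getD, List.getElem?_eq_getElem h2]

theorem pvFlatMap_range_getD {α β : Type} (l : List α) (d : α) (f : α → List β) :
    (List.range l.length).flatMap (fun r => f (l.getD r d)) = l.flatMap f := by
  conv_rhs => rw [← pvMap_getD_range l d]
  rw [List.flatMap_map]

theorem pvFlatMap_guard {α β : Type} (l : List α) (x : α) [BEq α] (f : α → List β) :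
    l.flatMap (fun ch => if ch == x then [] else f ch)
      = (l.filter (fun ch => !(ch == x))).flatMap f := by
  induction l with
  | nil => rfl
  | cons a l ih =>
      by_cases h : a == x <;> simp [h, ih]

-- main inner lemma: for pairwise-distinct positions, A's filtered product over all
-- replacement indices equals B's product over per-position non-matching characters
theorem pvInner_eq (alph : List Char) (ps : List Nat) (hps : ps.Pairwise (· ≠ ·)) :
    ∀ c : List Char,
      (pvProdRep (List.range alph.length) ps.length).filterMap (pvInnerA alph c ps)
        = (pvProdLists (ps.map (pvOpts alph c))).map (pvApplyB c ps) := by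
  induction ps with
  | nil =>
      intro c
      simp [pvProdRep, pvProdLists, pvInnerA, pvApplyB]
  | cons p ps ih =>
      intro c
      obtain ⟨hp, hps'⟩ := List.pairwise_cons.mp hps
      show (pvProdRep (List.range alph.length) (ps.length + 1)).filterMap
            (pvInnerA alph c (p :: ps)) = _
      rw [pvProdRep, List.filterMap_flatMap]
      have hstep : ∀ r : Nat,
          ((pvProdRep (List.range alph.length) ps.length).map (r :: ·)).filterMap
              (pvInnerA alph c (p :: ps))
            = (fun ch => if ch == c.getD p ' ' then ([] : List String)
                 else (pvProdLists (ps.map (pvOpts alph c))).map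
                        (fun cs => pvApplyB c (p :: ps) (ch :: cs)))
                (alph.getD r ' ') := by
        intro r
        rw [List.filterMap_map]
        by_cases h : alph.getD r ' ' = c.getD p ' '
        · simp only [h, beq_self_eq_true, if_pos]
          apply List.filterMap_eq_nil_iff.mpr
          intro rs _
          simp only [Function.comp_apply, pvInnerA, List.zip_cons_cons,
            List.foldl_cons, pvStepA]
          rw [if_pos (show (c.getD p ' ' == alph.getD r ' ') = true by rw [h]; exact beq_self_eq_true _)]
          simp [pvStepA_skip]
        · have hch : (c.getD p ' ' == alph.getD r ' ') = false :=
            beq_eq_false_iff_ne.mpr (Ne.symm h)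
          have hch' : (alph.getD r ' ' == c.getD p ' ') = false :=
            beq_eq_false_iff_ne.mpr h
          simp only [hch', Bool.false_eq_true, if_false]
          have hinner : ∀ rs : List Nat,
              pvInnerA alph c (p :: ps) (r :: rs)
                = pvInnerA alph (c.set p (alph.getD r ' ')) ps rs := by
            intro rs
            simp only [pvInnerA, List.zip_cons_cons, List.foldl_cons, pvStepA, hch,
              Bool.false_eq_true, if_neg, not_false_eq_true]
          calc (pvProdRep (List.range alph.length) ps.length).filterMap
                  (pvInnerA alph c (p :: ps) ∘ (r :: ·))
              = (pvProdRep (List.range alph.length) ps.length).filterMap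
                  (pvInnerA alph (c.set p (alph.getD r ' ')) ps) := by
                apply List.filterMap_congr; intro rs _; exact hinner rs
            _ = (pvProdLists (ps.map (pvOpts alph (c.set p (alph.getD r ' '))))).map
                  (pvApplyB (c.set p (alph.getD r ' ')) ps) := ih hps' _
            _ = (pvProdLists (ps.map (pvOpts alph c))).map
                  (fun cs => pvApplyB c (p :: ps) (alph.getD r ' ' :: cs)) := by
                have hopts : ps.map (pvOpts alph (c.set p (alph.getD r ' ')))
                    = ps.map (pvOpts alph c) := by
                  apply List.map_congr_left
                  intro q hq
                  have hqp : p ≠ q := hp q hq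
                  simp [pvOpts, List.getD, List.getElem?_set_ne hqp]
                rw [hopts]
                apply List.map_congr_left
                intro cs _
                simp [pvApplyB]
      calc (List.range alph.length).flatMap (fun r =>
              ((pvProdRep (List.range alph.length) ps.length).map (r :: ·)).filterMap
                (pvInnerA alph c (p :: ps)))
          = (List.range alph.length).flatMap (fun r =>
              (fun ch => if ch == c.getD p ' ' then ([] : List String)
                 else (pvProdLists (ps.map (pvOpts alph c))).map
                        (fun cs => pvApplyB c (p :: ps) (ch :: cs))) (alph.getD r ' ')) := by
            apply List.flatMap_congr; intro r _; exact hstep r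
        _ = alph.flatMap (fun ch => if ch == c.getD p ' ' then ([] : List String)
                 else (pvProdLists (ps.map (pvOpts alph c))).map
                        (fun cs => pvApplyB c (p :: ps) (ch :: cs))) :=
            pvFlatMap_range_getD alph ' ' (fun ch => if ch == c.getD p ' ' then ([] : List String)
                 else (pvProdLists (ps.map (pvOpts alph c))).map
                        (fun cs => pvApplyB c (p :: ps) (ch :: cs)))
        _ = (pvOpts alph c p).flatMap (fun ch =>
              (pvProdLists (ps.map (pvOpts alph c))).map
                (fun cs => pvApplyB c (p :: ps) (ch :: cs))) := by
            rw [pvFlatMap_guard]; rfl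
        _ = (pvProdLists (pvOpts alph c p :: ps.map (pvOpts alph c))).map
              (pvApplyB c (p :: ps)) := by
            simp [pvProdLists, List.map_flatMap, List.map_map, Function.comp_def]

theorem pvComb_sublist (l : List Nat) (k : Nat) : ∀ ps ∈ pvComb l k, ps.Sublist l := by
  induction l generalizing k with
  | nil => intro ps hps; cases k <;> simp_all [pvComb]
  | cons x xs ih =>
      intro ps hps
      cases k with
      | zero => simp [pvComb] at hps; simp [hps]
      | succ k =>
          simp only [pvComb] at hps
          split at hps
          · simp at hps
          · simp only [List.mem_append, List.mem_map] at hps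
            rcases hps with ⟨qs, hqs, rfl⟩ | hps
            · exact (ih k qs hqs).cons₂ x
            · exact (ih (k+1) ps hps).cons x

theorem pvComb_length (l : List Nat) (k : Nat) : ∀ ps ∈ pvComb l k, ps.length = k := by
  induction l generalizing k with
  | nil => intro ps hps; cases k <;> simp_all [pvComb]
  | cons x xs ih =>
      intro ps hps
      cases k with
      | zero => simp [pvComb] at hps; simp [hps]
      | succ k =>
          simp only [pvComb] at hps
          split at hps
          · simp at hps
          · simp only [List.mem_append, List.mem_map] at hps
            rcases hps with ⟨qs, hqs, rfl⟩ | hps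
            · simp [ih k qs hqs]
            · exact ih (k+1) ps hps

-- ===== VERDICT (by name: the statement is the Claim_ definition above) =====
theorem hamming_circle_spec : Claim_equal_hamming_circle := by
  intro sequence n alphabet _ _
  show hamming_circle sequence n alphabet = hamming_circle_alt sequence n alphabet
  unfold hamming_circle hamming_circle_alt
  apply List.flatMap_congr
  intro ps hps
  have hlen := pvComb_length _ _ ps hps
  have hpair : ps.Pairwise (· ≠ ·) :=
    ((List.pairwise_lt_range).sublist (pvComb_sublist _ _ ps hps)).imp Nat.ne_of_lt
  rw [← hlen]
  exact pvInner_eq _ ps hpair _
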